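-- pv_equiv track=rewrite | github.com/gk425/Guess-My-Saying-Game | GuessMySaying.py | blankSaying
-- ===== SOURCE A (Python) =====
-- def blankSaying(saying) :
--     allUpper = 'ABCDEFGHIJKLMNOPQRSTUVWXYZ'
--     allLower = 'abcdefghijklmnopqrstuvwxyz'
--     index = 0         # index is an index number
--     displayStr = ''   # displayStr is displaying the result
--     while index < len(saying) :
--         # This is for the marks e.g. ? ! . , ''
--         if not (saying[index] in allUpper) and not (saying[index] in allLower) :
--             displayStr = displayStr + saying[index]
--         # Making letters to blanks.
--         elif saying[index] in allUpper :
--             n = 0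
--             while n < len(allUpper) :
--                 if allUpper[n] == saying[index] :
--                     break
--                 n = n + 1
--             displayStr = displayStr + "_"
--         else :
--             n = 0
--             while n < len(allLower) :
--                 if allLower[n] == saying[index] :
--                     break
--                 n = n + 1
--             displayStr = displayStr + "_"
--         index = index + 1
--     return displayStr
-- ===== SOURCE B (Python) =====
-- _LETTERS = frozenset('ABCDEFGHIJKLMNOPQRSTUVWXYZabcdefghijklmnopqrstuvwxyz')
--
-- def blankSaying(saying):
--     # Run-length segmentation: find each maximal run of ASCII letters with a
--     # second pointer, emit that many underscores at once, copy other chars.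
--     parts = []
--     i = 0
--     n = len(saying)
--     while i < n:
--         if saying[i] in _LETTERS:
--             j = i
--             while j < n and saying[j] in _LETTERS:
--                 j += 1
--             parts.append('_' * (j - i))
--             i = j
--         else:
--             parts.append(saying[i])
--             i += 1
--     return ''.join(parts)
-- ===== Notes on version B (the rewrite author's own statement) =====
-- stated objective: faster
-- what changed: Replaces A's per-character while loop with branches, repeated string concatenation and dead inner search loops by run-length segmentation: a second pointer finds each maximal run of letters, emits that many underscores in one bulk step, and the collected pieces are joined once at the end.
import Mathlib
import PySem

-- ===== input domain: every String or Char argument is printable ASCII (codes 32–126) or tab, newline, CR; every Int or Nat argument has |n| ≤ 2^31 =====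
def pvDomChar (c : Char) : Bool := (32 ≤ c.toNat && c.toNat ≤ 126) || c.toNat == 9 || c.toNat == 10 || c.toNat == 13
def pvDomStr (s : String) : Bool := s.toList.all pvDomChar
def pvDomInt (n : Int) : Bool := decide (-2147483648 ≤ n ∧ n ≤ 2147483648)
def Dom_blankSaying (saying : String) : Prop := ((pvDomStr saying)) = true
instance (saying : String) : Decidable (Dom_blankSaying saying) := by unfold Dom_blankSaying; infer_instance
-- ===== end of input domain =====

-- B replaces A's per-character loop (with dead inner search loops) by run-length
-- segmentation over maximal letter runs; return values agree on all inputs.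

-- ===== PORT A =====
def pvAllUpper : List Char := "ABCDEFGHIJKLMNOPQRSTUVWXYZ".toList
def pvAllLower : List Char := "abcdefghijklmnopqrstuvwxyz".toList

-- A's inner 'while n < len(...)' search loop (its result n is never used by A)
def pvSearchA : List Char → Char → Nat → Nat
  | [], _, n => n
  | d :: rest, c, n => if d == c then n else pvSearchA rest c (n + 1)

-- A's outer 'while index < len(saying)' loop, accumulating displayStr
def pvLoopA : List Char → List Char → List Char
  | [], acc => acc
  | c :: rest, acc =>
    if !(pvAllUpper.contains c) && !(pvAllLower.contains c) then
      pvLoopA rest (acc ++ [c])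
    else if pvAllUpper.contains c then
      let _n := pvSearchA pvAllUpper c 0
      pvLoopA rest (acc ++ ['_'])
    else
      let _n := pvSearchA pvAllLower c 0
      pvLoopA rest (acc ++ ['_'])

def blankSaying (saying : String) : String := String.mk (pvLoopA saying.toList [])

-- ===== PORT B =====
-- Source B's module-level frozenset of the 52 letters (set -> PySem.Set of distinct elements)
def pvLetters : PySem.Set Char :=
  PySem.Set.ofList "ABCDEFGHIJKLMNOPQRSTUVWXYZabcdefghijklmnopqrstuvwxyz".toList

-- B's outer loop: on a letter, the inner 'while j < n' pointer walks the maximal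
-- run of letters (takeWhile) and '_' * (j - i) is appended; otherwise one char.
def pvLoopB : List Char → List Char
  | [] => []
  | c :: rest =>
    if pvLetters.contains c then
      (((c :: rest).takeWhile (fun d => pvLetters.contains d)).map (fun _ => '_'))
        ++ pvLoopB ((c :: rest).dropWhile (fun d => pvLetters.contains d))
    else
      c :: pvLoopB rest
  termination_by l => l.length
  decreasing_by
    · simp_all
      exact List.length_dropWhile_le _ _
    · simp

def blankSaying_alt (saying : String) : String := String.mk (pvLoopB saying.toList)

-- ===== PRECONDITION & SPEC =====
def Spec_blankSaying (saying : String) (out : String) : Prop := out = blankSaying_alt saying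
instance (saying : String) (out : String) : Decidable (Spec_blankSaying saying out) := by unfold Spec_blankSaying; infer_instance

-- ===== CLAIM (what is proved, stated in full; the proofs are below) =====
def Claim_equal_blankSaying : Prop := ∀ (saying : String), Dom_blankSaying saying → Spec_blankSaying saying (blankSaying saying)

-- ===== LEMMAS AND PROOFS =====

-- the common per-character value both sides produce
def pvStep (c : Char) : Char := if pvLetters.contains c then '_' else c

set_option maxRecDepth 8000 in
theorem pv_mem_letters (c : Char) :
    c ∈ (pvLetters : List Char) ↔ (c ∈ pvAllUpper ∨ c ∈ pvAllLower) := by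
  have h : "ABCDEFGHIJKLMNOPQRSTUVWXYZabcdefghijklmnopqrstuvwxyz".toList
      = pvAllUpper ++ pvAllLower := rfl
  rw [pvLetters, PySem.Set.mem_ofList, h, List.mem_append]

theorem pv_step_letter (c : Char) (h : c ∈ pvAllUpper ∨ c ∈ pvAllLower) :
    pvStep c = '_' := by
  have hm : c ∈ (pvLetters : List Char) := (pv_mem_letters c).mpr h
  simp [pvStep, PySem.Set.contains, hm]

theorem pv_step_other (c : Char) (h : ¬ (c ∈ pvAllUpper ∨ c ∈ pvAllLower)) :
    pvStep c = c := by
  have hm : c ∉ (pvLetters : List Char) := fun m => h ((pv_mem_letters c).mp m)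
  simp [pvStep, PySem.Set.contains, hm]

theorem pv_loopA_eq (l : List Char) (acc : List Char) :
    pvLoopA l acc = acc ++ l.map pvStep := by
  induction l generalizing acc with
  | nil => simp [pvLoopA]
  | cons c rest ih =>
    by_cases hu : c ∈ pvAllUpper
    · have hcu : pvAllUpper.contains c = true := by simpa using hu
      have hs := pv_step_letter c (Or.inl hu)
      simp [pvLoopA, hu, ih, hs]
    · have hcu : pvAllUpper.contains c = false := by simpa using hu
      by_cases hl : c ∈ pvAllLower
      · have hcl : pvAllLower.contains c = true := by simpa using hl
        have hs := pv_step_letter c (Or.inr hl)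
        simp [pvLoopA, hu, hl, ih, hs]
      · have hcl : pvAllLower.contains c = false := by simpa using hl
        have hs := pv_step_other c (fun h => h.elim hu hl)
        simp [pvLoopA, hu, hl, ih, hs]

set_option maxRecDepth 10000 in
theorem pv_loopB_eq (l : List Char) : pvLoopB l = l.map pvStep := by
  induction l using pvLoopB.induct with
  | case1 =>
    conv_lhs => rw [pvLoopB.eq_def]
    simp
  | case2 c rest h ih =>
    conv_lhs => rw [pvLoopB.eq_def]
    simp only [h, if_pos]
    have hsplit : ((c :: rest).takeWhile (fun d => pvLetters.contains d)).map pvStep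
        ++ ((c :: rest).dropWhile (fun d => pvLetters.contains d)).map pvStep
        = (c :: rest).map pvStep := by
      rw [← List.map_append, List.takeWhile_append_dropWhile]
    rw [ih, ← hsplit]
    congr 1
    apply List.map_congr_left
    intro d hd
    have hdm : d ∈ (pvLetters : List Char) := by simpa using List.mem_takeWhile_imp hd
    simp [pvStep, hdm]
  | case3 c rest h ih =>
    conv_lhs => rw [pvLoopB.eq_def]
    simp only [h]
    rw [ih]
    have hm : ¬ (c ∈ (pvLetters : List Char)) := by simpa using h
    have hs : pvStep c = c := by simp [pvStep, hm]
    simp [hs]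

-- ===== VERDICT (by name: the statement is the Claim_ definition above) =====
theorem blankSaying_spec : Claim_equal_blankSaying := by
  intro saying _
  unfold Spec_blankSaying blankSaying blankSaying_alt
  rw [pv_loopA_eq, pv_loopB_eq, List.nil_append]
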